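-- pv_equiv track=rewrite | github.com/gergely-elias/advent_of_code | 2017/d24p1.py | trackback_edges
-- ===== SOURCE A (Python) =====
-- def trackback_edges(path, edges_left):
--     vertices_left = set()
--     for edge in edges_left:
--         vertices_left.update(set(edge))
--     if path[-1] not in vertices_left:
--         yield path
--     for edge in edges_left:
--         if path[-1] in edge:
--             edges_left_copy = edges_left[:]
--             edges_left_copy.remove(edge)
--             for longer_path in trackback_edges(
--                 path + [sum(edge) - path[-1]], edges_left_copy
--             ):
--                 yield longer_path
-- ===== SOURCE B (Python) =====
-- def trackback_edges(path, edges_left):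
--     # Iterative DFS with an explicit stack of (path, edges_left) frames
--     # instead of recursion; children are pushed in reverse so the first
--     # incident edge is explored first, preserving the original yield order.
--     stack = [(path, edges_left)]
--     while stack:
--         p, es = stack.pop()
--         last = p[-1]
--         incident = [e for e in es if last in e]
--         if not incident:
--             yield p
--         else:
--             for e in reversed(incident):
--                 j = es.index(e)
--                 stack.append((p + [sum(e) - last], es[:j] + es[j + 1:]))
-- ===== Notes on version B (the rewrite author's own statement) =====
-- stated objective: alternative
-- what changed: The recursive generator is flattened into an iterative DFS over an explicit stack of (path, edges_left) frames, pushing children reverse-incident-edge order to preserve the exact yield order; the per-call vertex set is replaced by a direct incident-edge scan.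
import Mathlib
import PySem

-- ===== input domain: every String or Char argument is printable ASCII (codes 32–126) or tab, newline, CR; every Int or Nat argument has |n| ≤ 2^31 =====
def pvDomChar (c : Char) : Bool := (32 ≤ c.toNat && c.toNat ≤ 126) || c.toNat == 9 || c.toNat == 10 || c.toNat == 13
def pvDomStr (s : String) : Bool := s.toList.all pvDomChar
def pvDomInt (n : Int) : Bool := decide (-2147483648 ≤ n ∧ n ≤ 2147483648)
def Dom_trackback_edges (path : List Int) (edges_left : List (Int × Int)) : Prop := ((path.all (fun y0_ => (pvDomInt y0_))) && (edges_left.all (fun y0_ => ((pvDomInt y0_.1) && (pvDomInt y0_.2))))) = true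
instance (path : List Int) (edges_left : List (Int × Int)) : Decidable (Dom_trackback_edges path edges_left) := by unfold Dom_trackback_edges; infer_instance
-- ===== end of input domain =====

-- B flattens A's recursive generator into an iterative DFS over an explicit stack of
-- (path, edges_left) frames (children pushed in reverse to keep the yield order);
-- same asymptotic cost, alternative decomposition.

-- ===== PORT A =====
-- Literal port of A's recursion; the fuel guard only makes the recursion total:
-- the entry supplies edges_left.length + 1, which is exactly enough on every branch
-- (each recursive call removes one edge), so the 0-fuel branch is never taken.
def pvTrackA : Nat → List Int → List (Int × Int) → List (List Int)
  | 0, _, _ => []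
  | fuel + 1, path, es =>
    -- vertices_left = set(); for edge in edges_left: vertices_left.update(set(edge))
    -- (set(edge) iterates in hash order; only membership is used, so add e.1 then e.2 is exact)
    let vs : PySem.Set Int := es.foldl (fun s e => PySem.Set.update s [e.1, e.2]) PySem.Set.empty
    -- path[-1]; Pre_ excludes path = [], where Python raises IndexError
    let last : Int := PySem.List.pyGetD path (-1) 0
    (if PySem.Set.contains vs last then [] else [path]) ++
    es.flatMap (fun e =>
      if last == e.1 || last == e.2 then
        -- edges_left_copy.remove(edge): remove first equal occurrence; e ∈ es so remove? is some
        pvTrackA fuel (path ++ [e.1 + e.2 - last]) ((PySem.List.remove? es e).getD [])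
      else [])

def trackback_edges (path : List Int) (edges_left : List (Int × Int)) : List (List Int) :=
  pvTrackA (edges_left.length + 1) path edges_left

-- ===== PORT B =====
-- fuel bound for the while loop: Wfuel n iterations suffice for a frame with n edges
def pvWfuel : Nat → Nat
  | 0 => 1
  | n + 1 => 1 + (n + 1) * pvWfuel n

-- the while loop; stack top is the list head, so pushing the reversed children list
-- then popping processes 'children ++ rest' in order
def pvRunB : Nat → List (List Int × List (Int × Int)) → List (List Int)
  | 0, _ => []
  | _ + 1, [] => []
  | fuel + 1, (p, es) :: rest =>
    let last : Int := PySem.List.pyGetD p (-1) 0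
    let incident := es.filter (fun e => last == e.1 || last == e.2)
    if incident.isEmpty then
      p :: pvRunB fuel rest
    else
      -- es[:j] + es[j+1:] with j = es.index(e) = remove first equal occurrence
      pvRunB fuel
        ((incident.map (fun e => (p ++ [e.1 + e.2 - last], (PySem.List.remove? es e).getD []))) ++ rest)

def trackback_edges_alt (path : List Int) (edges_left : List (Int × Int)) : List (List Int) :=
  pvRunB (pvWfuel edges_left.length) [(path, edges_left)]

-- ===== PRECONDITION & SPEC =====
-- Pre_ excludes only the empty path, on which Python's path[-1] raises IndexError.
def Pre_trackback_edges (path : List Int) (edges_left : List (Int × Int)) : Prop := path ≠ []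
instance (path : List Int) (edges_left : List (Int × Int)) : Decidable (Pre_trackback_edges path edges_left) := by unfold Pre_trackback_edges; infer_instance
def pvWitness_trackback_edges : List Int × (List (Int × Int)) := ([0], [(0, 1), (1, 2)])

def Spec_trackback_edges (path : List Int) (edges_left : List (Int × Int)) (out : List (List Int)) : Prop := out = trackback_edges_alt path edges_left
instance (path : List Int) (edges_left : List (Int × Int)) (out : List (List Int)) : Decidable (Spec_trackback_edges path edges_left out) := by unfold Spec_trackback_edges; infer_instance

-- ===== CLAIM (what is proved, stated in full; the proofs are below) =====
def Claim_equal_trackback_edges : Prop := ∀ (path : List Int) (edges_left : List (Int × Int)), Dom_trackback_edges path edges_left → Pre_trackback_edges path edges_left → Spec_trackback_edges path edges_left (trackback_edges path edges_left)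

-- ===== LEMMAS AND PROOFS =====

theorem pvWfuel_pos (n : Nat) : 1 ≤ pvWfuel n := by
  cases n <;> simp [pvWfuel]

theorem pvTrackA_succ (fuel : Nat) (path : List Int) (es : List (Int × Int)) :
    pvTrackA (fuel + 1) path es =
      (let vs : PySem.Set Int := es.foldl (fun s e => PySem.Set.update s [e.1, e.2]) PySem.Set.empty
       let last : Int := PySem.List.pyGetD path (-1) 0
       (if PySem.Set.contains vs last then [] else [path]) ++
       es.flatMap (fun e =>
         if last == e.1 || last == e.2 then
           pvTrackA fuel (path ++ [e.1 + e.2 - last]) ((PySem.List.remove? es e).getD [])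
         else [])) := rfl

theorem pv_contains_update (s : PySem.Set Int) (a b x : Int) :
    PySem.Set.contains (PySem.Set.update s [a, b]) x =
      (PySem.Set.contains s x || x == a || x == b) := by
  have : PySem.Set.update s [a, b] = PySem.Set.add (PySem.Set.add s a) b := rfl
  rw [this]
  simp only [PySem.Set.contains, List.contains_eq_mem, PySem.Set.mem_add]
  have t1 : (x == a) = decide (x = a) := rfl
  have t2 : (x == b) = decide (x = b) := rfl
  by_cases h1 : x = a <;> by_cases h2 : x = b <;> simp [t1, t2, h1, h2]

theorem pv_vs_contains (es : List (Int × Int)) (x : Int) :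
    ∀ (init : PySem.Set Int),
      PySem.Set.contains (es.foldl (fun s e => PySem.Set.update s [e.1, e.2]) init) x =
        (PySem.Set.contains init x || es.any (fun e => x == e.1 || x == e.2)) := by
  induction es with
  | nil => intro init; simp
  | cons e es ih =>
    intro init
    simp only [List.foldl_cons, List.any_cons, ih, pv_contains_update]
    ac_rfl

theorem pv_flatMap_if_filter {α β : Type} (es : List α) (P : α → Bool)
    (f g : α → List β) (h : ∀ e ∈ es, P e = true → f e = g e) :
    es.flatMap (fun e => if P e then f e else []) = (es.filter P).flatMap g := by
  induction es with
  | nil => rfl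
  | cons e es ih =>
    simp only [List.flatMap_cons, List.filter_cons]
    by_cases hp : P e = true
    · rw [if_pos hp, hp, if_pos rfl, List.flatMap_cons,
        h e (List.mem_cons_self) hp, ih (fun e he => h e (List.mem_cons_of_mem _ he))]
    · rw [if_neg hp, eq_false_of_ne_true hp, if_neg (by simp),
        ih (fun e he => h e (List.mem_cons_of_mem _ he))]
      simp

theorem pv_A_unfold (p : List Int) (es : List (Int × Int)) :
    trackback_edges p es =
      (let last : Int := PySem.List.pyGetD p (-1) 0
       if es.any (fun e => last == e.1 || last == e.2) then
         ((es.filter (fun e => last == e.1 || last == e.2)).map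
           (fun e => (p ++ [e.1 + e.2 - last], (PySem.List.remove? es e).getD []))).flatMap
           (fun c => trackback_edges c.1 c.2)
       else [p]) := by
  rw [trackback_edges, pvTrackA_succ]
  simp only [pv_vs_contains]
  set last : Int := PySem.List.pyGetD p (-1) 0 with hlast
  rw [pv_flatMap_if_filter es (fun e => last == e.1 || last == e.2) _
      (fun e => trackback_edges (p ++ [e.1 + e.2 - last]) ((PySem.List.remove? es e).getD []))
      (by
        intro e he hP
        have hr : PySem.List.remove? es e = some (es.erase e) :=
          PySem.List.remove?_eq_some_erase es e he
        have hlen : (es.erase e).length = es.length - 1 := List.length_erase_of_mem he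
        have hpos : 1 ≤ es.length := List.length_pos_of_mem he
        simp only [trackback_edges, hr, Option.getD_some, hlen]
        congr 1
        omega)]
  rw [List.flatMap_map]
  by_cases h : es.any (fun e => last == e.1 || last == e.2) = true
  · simp only [PySem.Set.contains, PySem.Set.empty, List.contains_eq_mem, List.not_mem_nil,
      decide_false, Bool.false_or, h, if_pos]
    simp
  · have hfalse : es.any (fun e => last == e.1 || last == e.2) = false :=
      eq_false_of_ne_true h
    have hnil : es.filter (fun e => last == e.1 || last == e.2) = [] := by
      rw [List.filter_eq_nil_iff]
      intro e he
      simpa using List.any_eq_false.mp hfalse e he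
    simp only [PySem.Set.contains, PySem.Set.empty, List.contains_eq_mem, List.not_mem_nil,
      decide_false, Bool.false_or, hfalse, hnil]
    simp

theorem pv_runB_correct : ∀ (fuel : Nat) (stack : List (List Int × List (Int × Int))),
    (stack.map (fun fr => pvWfuel fr.2.length)).sum ≤ fuel →
    pvRunB fuel stack = stack.flatMap (fun fr => trackback_edges fr.1 fr.2) := by
  intro fuel
  induction fuel with
  | zero =>
    intro stack h
    cases stack with
    | nil => rfl
    | cons fr rest =>
      exfalso
      simp only [List.map_cons, List.sum_cons, Nat.le_zero] at h
      have := pvWfuel_pos fr.2.length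
      omega
  | succ fuel ih =>
    intro stack h
    cases stack with
    | nil => rfl
    | cons fr rest =>
      obtain ⟨p, es⟩ := fr
      simp only [List.map_cons, List.sum_cons] at h
      simp only [pvRunB]
      set last : Int := PySem.List.pyGetD p (-1) 0 with hlast
      set inc : Int × Int → Bool := fun e => last == e.1 || last == e.2 with hinc
      by_cases hempty : (es.filter inc).isEmpty = true
      · rw [if_pos hempty]
        have hany : es.any inc = false := by
          rw [List.any_eq_false]
          intro e he
          exact (List.filter_eq_nil_iff.mp (List.isEmpty_iff.mp hempty)) e he
        have hrest : (rest.map (fun fr => pvWfuel fr.2.length)).sum ≤ fuel := by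
          have := pvWfuel_pos es.length; omega
        rw [ih rest hrest, List.flatMap_cons, pv_A_unfold]
        simp [← hlast, ← hinc, hany]
      · rw [if_neg hempty]
        have hne : es.filter inc ≠ [] := fun hn => hempty (by simp [hn])
        have hespos : 1 ≤ es.length := by
          rcases List.exists_mem_of_ne_nil _ hne with ⟨e, he⟩
          exact List.length_pos_of_mem (List.mem_of_mem_filter he)
        -- sum bound for the children
        have hchild : (((es.filter inc).map
            (fun e => (p ++ [e.1 + e.2 - last], (PySem.List.remove? es e).getD []))).map
              (fun fr => pvWfuel fr.2.length)).sum
            ≤ (es.filter inc).length * pvWfuel (es.length - 1) := by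
          rw [List.map_map]
          have hb : ∀ x ∈ (es.filter inc).map
              ((fun fr => pvWfuel fr.2.length) ∘
                (fun e => (p ++ [e.1 + e.2 - last], (PySem.List.remove? es e).getD []))),
              x ≤ pvWfuel (es.length - 1) := by
            intro x hx
            rcases List.mem_map.mp hx with ⟨e, he, rfl⟩
            have hee := List.mem_of_mem_filter he
            have hr : PySem.List.remove? es e = some (es.erase e) :=
              PySem.List.remove?_eq_some_erase es e hee
            simp only [Function.comp, hr, Option.getD_some,
              List.length_erase_of_mem hee, le_refl]
          calc _ ≤ _ := List.sum_le_card_nsmul _ _ hb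
            _ = (es.filter inc).length * pvWfuel (es.length - 1) := by
              simp [smul_eq_mul]
        have hWn : pvWfuel es.length = 1 + es.length * pvWfuel (es.length - 1) := by
          obtain ⟨m, hm⟩ : ∃ m, es.length = m + 1 := ⟨es.length - 1, by omega⟩
          rw [hm]; simp [pvWfuel]
        have hfilter_le : (es.filter inc).length ≤ es.length := List.length_filter_le _ _
        have hsum : ((((es.filter inc).map
            (fun e => (p ++ [e.1 + e.2 - last], (PySem.List.remove? es e).getD []))) ++ rest).map
              (fun fr => pvWfuel fr.2.length)).sum ≤ fuel := by
          rw [List.map_append, List.sum_append]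
          have h1 : (es.filter inc).length * pvWfuel (es.length - 1)
              ≤ es.length * pvWfuel (es.length - 1) :=
            Nat.mul_le_mul_right _ hfilter_le
          omega
        rw [ih _ hsum, List.flatMap_append, List.flatMap_cons, pv_A_unfold]
        have hany : es.any inc = true := by
          rcases List.exists_mem_of_ne_nil _ hne with ⟨e, he⟩
          exact List.any_eq_true.mpr ⟨e, List.mem_of_mem_filter he, List.of_mem_filter he⟩
        simp [← hlast, ← hinc, hany]

-- ===== VERDICT (by name: the statement is the Claim_ definition above) =====
theorem trackback_edges_spec : Claim_equal_trackback_edges := by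
  intro path edges_left _ _
  unfold Spec_trackback_edges trackback_edges_alt
  rw [pv_runB_correct (pvWfuel edges_left.length) [(path, edges_left)] (by simp)]
  simp
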